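-- pv_equiv track=rewrite | github.com/lwiecek/advent-of-code | day06.py | part_one
-- ===== SOURCE A (Python) =====
-- import itertools
--
-- def get_min_max(fragments):
--     return tuple(int(v) for v in (fragments[0] + ',' + fragments[2]).split(','))
--
-- def walk(min_x, min_y, max_x, max_y, func):
--     for coord in itertools.product(range(min_x, max_x + 1), range(min_y, max_y + 1)):
--         func(coord)
--
-- def update(line, turn_on, turn_off, toggle):
--     fragments = line.split()
--     if line.startswith('turn on'):
--         walk(*get_min_max(fragments[2:]), func=turn_on)
--     elif line.startswith('turn off'):
--         walk(*get_min_max(fragments[2:]), func=turn_off)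
--     elif line.startswith('toggle'):
--         walk(*get_min_max(fragments[1:]), func=toggle)
--
-- def part_one(lines):
--     '''
--     Because your neighbors keep defeating you in the holiday house decorating
--     contest year after year, you've decided to deploy one million lights in a
--     1000x1000 grid.
--
--     Furthermore, because you've been especially nice this year, Santa has
--     mailed you instructions on how to display the ideal lighting configuration.
--
--     Lights in your grid are numbered from 0 to 999 in each direction; the
--     lights at each corner are at 0,0, 0,999, 999,999, and 999,0. The
--     instructions include whether to turn on, turn off, or toggle various
--     inclusive ranges given as coordinate pairs. Each coordinate pair represents
--     opposite corners of a rectangle, inclusive; a coordinate pair like 0,0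
--     through 2,2 therefore refers to 9 lights in a 3x3 square. The lights all
--     start turned off.
--
--     To defeat your neighbors this year, all you have to do is set up your
--     lights by doing the instructions Santa sent you in order.
--
--     After following the instructions, how many lights are lit?
--     '''
--     on = set()
--     def toggle(c):
--         if c in on:
--             on.remove(c)
--         else:
--             on.add(c)
--
--     for line in lines:
--         update(line, on.add, on.discard, toggle)
--
--     return len(on)
-- ===== SOURCE B (Python) =====
-- def part_one(lines):
--     # Parse every instruction once, then sweep the bounding box cell by cell,
--     # computing each cell's final state functionally (no set is maintained).
--     instrs = []
--     for line in lines: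
--         f = line.split()
--         if line.startswith('turn on'):
--             op, a, b = 1, f[2], f[4]
--         elif line.startswith('turn off'):
--             op, a, b = 0, f[2], f[4]
--         elif line.startswith('toggle'):
--             op, a, b = 2, f[1], f[3]
--         else:
--             continue
--         x1, y1, x2, y2 = (int(v) for v in (a + ',' + b).split(','))
--         instrs.append((op, x1, y1, x2, y2))
--     if not instrs:
--         return 0
--     min_x = min(i[1] for i in instrs)
--     max_x = max(i[3] for i in instrs)
--     min_y = min(i[2] for i in instrs)
--     max_y = max(i[4] for i in instrs)
--     total = 0
--     for x in range(min_x, max_x + 1):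
--         for y in range(min_y, max_y + 1):
--             lit = False
--             for op, x1, y1, x2, y2 in instrs:
--                 if x1 <= x <= x2 and y1 <= y <= y2:
--                     lit = (not lit) if op == 2 else (op == 1)
--             total += lit
--     return total
-- ===== Notes on version B (the rewrite author's own statement) =====
-- stated objective: alternative
-- what changed: B replaces A's instruction-major mutation of a set of lit cells by a cell-major sweep: it parses all instructions once, then for each cell of the bounding box folds the instruction list to compute that cell's final on/off state functionally and sums the count, maintaining no set at all.
import Mathlib
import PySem

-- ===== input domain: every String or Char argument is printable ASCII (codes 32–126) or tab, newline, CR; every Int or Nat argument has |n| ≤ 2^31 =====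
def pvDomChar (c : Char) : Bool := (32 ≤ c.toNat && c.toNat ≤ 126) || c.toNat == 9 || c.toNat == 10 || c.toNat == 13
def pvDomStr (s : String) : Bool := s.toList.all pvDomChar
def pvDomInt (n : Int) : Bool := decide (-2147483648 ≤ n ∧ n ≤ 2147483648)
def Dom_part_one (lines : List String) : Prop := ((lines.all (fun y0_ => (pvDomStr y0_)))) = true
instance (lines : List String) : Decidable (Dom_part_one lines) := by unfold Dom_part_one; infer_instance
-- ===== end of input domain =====

-- B replaces A's instruction-major mutation of a set of lit cells by a cell-major sweep of the
-- bounding box that computes each cell's final state functionally (objective: alternative).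

-- ===== PORT A =====

-- get_min_max(fragments): tuple(int(v) for v in (fragments[0]+','+fragments[2]).split(','));
-- the joined string is built with join (equal to Python's '+' concatenation); none exactly
-- where Python raises (IndexError/ValueError).
def pvGetMinMax (fragments : List String) : Option (List Int) :=
  match PySem.List.pyGet? fragments 0, PySem.List.pyGet? fragments 2 with
  | some a, some c =>
      ((PySem.Str.split? (PySem.Str.join "," [a, c]) ",").getD []).mapM PySem.Int.ofStr?
  | _, _ => none

-- walk(min_x, min_y, max_x, max_y, func): itertools.product of the two ranges, x-major,
-- written as the equivalent nested fold; func is the set-updating operation.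
def pvWalkA (x1 y1 x2 y2 : Int)
    (f : PySem.Set (Int × Int) → (Int × Int) → PySem.Set (Int × Int))
    (s : PySem.Set (Int × Int)) : PySem.Set (Int × Int) :=
  (PySem.List.pyRange x1 (x2 + 1)).foldl
    (fun s x => (PySem.List.pyRange y1 (y2 + 1)).foldl (fun s y => f s (x, y)) s) s

-- update(line, on.add, on.discard, toggle) acting on the set; where Python raises
-- (missing token, non-int coordinate, coordinate count != 4) the port leaves the set
-- unchanged — exactly those inputs are excluded by Pre_part_one.
def pvUpdateA (s : PySem.Set (Int × Int)) (line : String) : PySem.Set (Int × Int) :=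
  let fragments := PySem.Str.split₀ line
  if PySem.Str.startswith line "turn on" then
    match pvGetMinMax (PySem.List.slice fragments (some 2) none) with
    | some [x1, y1, x2, y2] => pvWalkA x1 y1 x2 y2 (fun s c => PySem.Set.add s c) s
    | _ => s
  else if PySem.Str.startswith line "turn off" then
    match pvGetMinMax (PySem.List.slice fragments (some 2) none) with
    | some [x1, y1, x2, y2] => pvWalkA x1 y1 x2 y2 (fun s c => PySem.Set.discard s c) s
    | _ => s
  else if PySem.Str.startswith line "toggle" then
    match pvGetMinMax (PySem.List.slice fragments (some 1) none) with
    | some [x1, y1, x2, y2] =>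
        pvWalkA x1 y1 x2 y2
          (fun s c => if PySem.Set.contains s c then PySem.Set.discard s c else PySem.Set.add s c) s
    | _ => s
  else s

def part_one (lines : List String) : Int :=
  PySem.Set.len (lines.foldl pvUpdateA PySem.Set.empty)

-- ===== PORT B =====

-- one line of Source B's parsing loop body: some (op, x1, y1, x2, y2), none = 'continue'
-- (a Python raise inside the loop is excluded by Pre_part_one)
def pvParseLine (line : String) : Option (Int × Int × Int × Int × Int) :=
  let f := PySem.Str.split₀ line
  let sel : Option (Int × String × String) :=
    if PySem.Str.startswith line "turn on" then
      match PySem.List.pyGet? f 2, PySem.List.pyGet? f 4 with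
      | some a, some b => some (1, a, b)
      | _, _ => none
    else if PySem.Str.startswith line "turn off" then
      match PySem.List.pyGet? f 2, PySem.List.pyGet? f 4 with
      | some a, some b => some (0, a, b)
      | _, _ => none
    else if PySem.Str.startswith line "toggle" then
      match PySem.List.pyGet? f 1, PySem.List.pyGet? f 3 with
      | some a, some b => some (2, a, b)
      | _, _ => none
    else none
  match sel with
  | none => none
  | some (op, a, b) =>
      match ((PySem.Str.split? (PySem.Str.join "," [a, b]) ",").getD []).mapM PySem.Int.ofStr? with
      | some [x1, y1, x2, y2] => some (op, x1, y1, x2, y2)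
      | _ => none

-- the innermost loop of Source B: fold the instructions over one cell
def pvLitFrom (instrs : List (Int × Int × Int × Int × Int)) (x y : Int) (b : Bool) : Bool :=
  instrs.foldl
    (fun lit i =>
      match i with
      | (op, x1, y1, x2, y2) =>
          if x1 ≤ x ∧ x ≤ x2 ∧ y1 ≤ y ∧ y ≤ y2 then (if op == 2 then !lit else op == 1) else lit)
    b

def part_one_alt (lines : List String) : Int :=
  let instrs := lines.foldl
    (fun acc line => match pvParseLine line with
      | some i => acc ++ [i]
      | none => acc) []
  if instrs = [] then 0
  else
    match PySem.List.min? (instrs.map (fun i => i.2.1)) id,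
          PySem.List.max? (instrs.map (fun i => i.2.2.2.1)) id,
          PySem.List.min? (instrs.map (fun i => i.2.2.1)) id,
          PySem.List.max? (instrs.map (fun i => i.2.2.2.2)) id with
    | some minX, some maxX, some minY, some maxY =>
        (PySem.List.pyRange minX (maxX + 1)).foldl
          (fun t x =>
            (PySem.List.pyRange minY (maxY + 1)).foldl
              (fun t y => t + (if pvLitFrom instrs x y false then 1 else 0)) t) 0
    | _, _, _, _ => 0

-- ===== PRECONDITION & SPEC =====

-- a command line parses to exactly four ints (otherwise Python raises)
def pvFourInts (a b : String) : Bool :=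
  match ((PySem.Str.split? (PySem.Str.join "," [a, b]) ",").getD []).mapM PySem.Int.ofStr? with
  | some l => l.length == 4
  | none => false

def pvLineOk (line : String) : Bool :=
  let f := PySem.Str.split₀ line
  if PySem.Str.startswith line "turn on" ∨ PySem.Str.startswith line "turn off" then
    match PySem.List.pyGet? f 2, PySem.List.pyGet? f 4 with
    | some a, some b => pvFourInts a b
    | _, _ => false
  else if PySem.Str.startswith line "toggle" then
    match PySem.List.pyGet? f 1, PySem.List.pyGet? f 3 with
    | some a, some b => pvFourInts a b
    | _, _ => false
  else true

-- fragments[k:] indexing: (f[k:])[0] = f[k], (f[k:])[2] = f[k+2]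

-- Pre_ excludes exactly the inputs on which A raises: a command line with a missing token
-- (IndexError), a non-integer coordinate (ValueError) or a coordinate count ≠ 4 (TypeError).
def Pre_part_one (lines : List String) : Prop := (lines.all pvLineOk) = true
instance (lines : List String) : Decidable (Pre_part_one lines) := by
  unfold Pre_part_one; infer_instance

def pvWitness_part_one : List String :=
  ["turn on 0,0 through 2,2", "toggle 1,1 through 3,3", "turn off 0,0 through 0,1", "lights out"]

def Spec_part_one (lines : List String) (out : Int) : Prop := out = part_one_alt lines
instance (lines : List String) (out : Int) : Decidable (Spec_part_one lines out) := by
  unfold Spec_part_one; infer_instance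

-- ===== CLAIM (what is proved, stated in full; the proofs are below) =====
def Claim_equal_part_one : Prop :=
  ∀ (lines : List String), Dom_part_one lines → Pre_part_one lines →
    Spec_part_one lines (part_one lines)

-- ===== LEMMAS AND PROOFS =====

def pvProd (x1 y1 x2 y2 : Int) : List (Int × Int) :=
  (PySem.List.pyRange x1 (x2 + 1)) ×ˢ (PySem.List.pyRange y1 (y2 + 1))

theorem pv_walk_eq_foldl_prod (x1 y1 x2 y2 : Int) (f) (s) :
    pvWalkA x1 y1 x2 y2 f s = (pvProd x1 y1 x2 y2).foldl f s := by
  simp [pvWalkA, pvProd, SProd.sprod, List.product, List.foldl_flatMap, List.foldl_map]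

theorem pv_nodup_prod (x1 y1 x2 y2 : Int) : (pvProd x1 y1 x2 y2).Nodup :=
  List.Nodup.product (PySem.List.nodup_pyRange_one _ _) (PySem.List.nodup_pyRange_one _ _)

theorem pv_mem_prod (x1 y1 x2 y2 : Int) (c : Int × Int) :
    c ∈ pvProd x1 y1 x2 y2 ↔ (x1 ≤ c.1 ∧ c.1 ≤ x2 ∧ y1 ≤ c.2 ∧ c.2 ≤ y2) := by
  obtain ⟨a, b⟩ := c
  simp [pvProd, List.mem_product, PySem.List.mem_pyRange_one]
  omega

theorem pv_mem_foldl_of_not_mem {c : Int × Int} {L : List (Int × Int)} {f}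
    (h1 : ∀ s a, a ≠ c → (c ∈ f s a ↔ c ∈ s)) (hc : c ∉ L) :
    ∀ s : PySem.Set (Int × Int), (c ∈ L.foldl f s ↔ c ∈ s) := by
  induction L with
  | nil => intro s; rfl
  | cons a t ih =>
    intro s
    simp only [List.mem_cons, not_or] at hc
    rw [List.foldl_cons, ih hc.2, h1 s a (fun h => hc.1 h.symm)]

theorem pv_mem_foldl_cells {c : Int × Int} {L : List (Int × Int)} (hL : L.Nodup) {f}
    (g : Bool → Bool)
    (h1 : ∀ s a, a ≠ c → (c ∈ f s a ↔ c ∈ s))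
    (h2 : ∀ s : PySem.Set (Int × Int), (c ∈ f s c ↔ g (decide (c ∈ s)) = true)) :
    ∀ s : PySem.Set (Int × Int),
      (c ∈ L.foldl f s ↔ (if c ∈ L then g (decide (c ∈ s)) else decide (c ∈ s)) = true) := by
  induction L with
  | nil => intro s; simp
  | cons a t ih =>
    intro s
    rcases List.nodup_cons.mp hL with ⟨ha, ht⟩
    by_cases hac : a = c
    · subst hac
      rw [List.foldl_cons, pv_mem_foldl_of_not_mem h1 ha, h2 s]
      simp
    · rw [List.foldl_cons, ih ht]
      have hmem : (c ∈ a :: t) ↔ c ∈ t :=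
        ⟨fun h => (List.mem_cons.mp h).resolve_left (fun h' => hac h'.symm), List.mem_cons_of_mem a⟩
      have hd : (decide (c ∈ f s a)) = decide (c ∈ s) := by simp [h1 s a hac]
      rw [hd]
      simp only [hmem]

def pvInRect (i : Int × Int × Int × Int × Int) (c : Int × Int) : Prop :=
  i.2.1 ≤ c.1 ∧ c.1 ≤ i.2.2.2.1 ∧ i.2.2.1 ≤ c.2 ∧ c.2 ≤ i.2.2.2.2

def pvStep (i : Int × Int × Int × Int × Int) (c : Int × Int) (b : Bool) : Bool :=
  if i.2.1 ≤ c.1 ∧ c.1 ≤ i.2.2.2.1 ∧ i.2.2.1 ≤ c.2 ∧ c.2 ≤ i.2.2.2.2 then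
    (if i.1 == 2 then !b else i.1 == 1)
  else b

def pvApply (s : PySem.Set (Int × Int)) (i : Int × Int × Int × Int × Int) :
    PySem.Set (Int × Int) :=
  match i with
  | (op, x1, y1, x2, y2) =>
      if op == 1 then pvWalkA x1 y1 x2 y2 (fun s c => PySem.Set.add s c) s
      else if op == 0 then pvWalkA x1 y1 x2 y2 (fun s c => PySem.Set.discard s c) s
      else pvWalkA x1 y1 x2 y2
        (fun s c => if PySem.Set.contains s c then PySem.Set.discard s c else PySem.Set.add s c) s

theorem pv_mem_walk {c : Int × Int} (x1 y1 x2 y2 : Int)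
    {f : PySem.Set (Int × Int) → (Int × Int) → PySem.Set (Int × Int)} (g : Bool → Bool)
    (h1 : ∀ s a, a ≠ c → (c ∈ f s a ↔ c ∈ s))
    (h2 : ∀ s : PySem.Set (Int × Int), (c ∈ f s c ↔ g (decide (c ∈ s)) = true))
    (s : PySem.Set (Int × Int)) :
    (c ∈ pvWalkA x1 y1 x2 y2 f s ↔
      (if x1 ≤ c.1 ∧ c.1 ≤ x2 ∧ y1 ≤ c.2 ∧ c.2 ≤ y2 then g (decide (c ∈ s))
       else decide (c ∈ s)) = true) := by
  rw [pv_walk_eq_foldl_prod,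
    pv_mem_foldl_cells (pv_nodup_prod x1 y1 x2 y2) g h1 h2 s]
  simp only [pv_mem_prod]

theorem pv_mem_apply (s : PySem.Set (Int × Int)) (i : Int × Int × Int × Int × Int)
    (c : Int × Int) (hop : i.1 = 0 ∨ i.1 = 1 ∨ i.1 = 2) :
    (c ∈ pvApply s i ↔ pvStep i c (decide (c ∈ s)) = true) := by
  obtain ⟨op, x1, y1, x2, y2⟩ := i
  simp only at hop
  rcases hop with h | h | h <;> subst h
  · rw [show pvApply s (0, x1, y1, x2, y2)
        = pvWalkA x1 y1 x2 y2 (fun s c => PySem.Set.discard s c) s from rfl,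
      pv_mem_walk x1 y1 x2 y2 (fun _ => false)
      (fun s a ha => by
        have hca : c ≠ a := fun h => ha h.symm
        rw [PySem.Set.mem_discard]; simp [hca])
      (fun s => by simp [PySem.Set.mem_discard]) s]
    simp [pvStep]
  · rw [show pvApply s (1, x1, y1, x2, y2)
        = pvWalkA x1 y1 x2 y2 (fun s c => PySem.Set.add s c) s from rfl,
      pv_mem_walk x1 y1 x2 y2 (fun _ => true)
      (fun s a ha => by
        have hca : c ≠ a := fun h => ha h.symm
        rw [PySem.Set.mem_add]; simp [hca])
      (fun s => by simp [PySem.Set.mem_add]) s]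
    simp [pvStep]
  · rw [show pvApply s (2, x1, y1, x2, y2)
        = pvWalkA x1 y1 x2 y2
            (fun s c => if PySem.Set.contains s c then PySem.Set.discard s c else PySem.Set.add s c) s
        from rfl,
      pv_mem_walk x1 y1 x2 y2 (fun b => !b)
      (fun s a ha => by
        have hca : c ≠ a := fun h => ha h.symm
        by_cases hc : a ∈ s <;>
          simp [hc, PySem.Set.contains_iff, PySem.Set.mem_discard, PySem.Set.mem_add, hca])
      (fun s => by
        by_cases hc : PySem.Set.contains s c
        · simp [hc, PySem.Set.mem_discard, (PySem.Set.contains_iff s c).mp hc]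
        · have hns : c ∉ s := fun h => hc ((PySem.Set.contains_iff s c).mpr h)
          simp [hc, PySem.Set.mem_add, hns]) s]
    simp [pvStep]

theorem pv_nodup_walk (x1 y1 x2 y2 : Int) {f}
    (hf : ∀ (s : PySem.Set (Int × Int)) a, s.Nodup → (f s a).Nodup)
    (s : PySem.Set (Int × Int)) (hs : s.Nodup) : (pvWalkA x1 y1 x2 y2 f s).Nodup := by
  rw [pv_walk_eq_foldl_prod]
  induction pvProd x1 y1 x2 y2 generalizing s with
  | nil => exact hs
  | cons a t ih => exact ih _ (hf s a hs)

theorem pv_nodup_apply (s : PySem.Set (Int × Int)) (i : Int × Int × Int × Int × Int)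
    (h : s.Nodup) : (pvApply s i).Nodup := by
  obtain ⟨op, x1, y1, x2, y2⟩ := i
  unfold pvApply
  dsimp only
  split_ifs
  · exact pv_nodup_walk _ _ _ _ (fun s a hs => PySem.Set.nodup_add s a hs) s h
  · exact pv_nodup_walk _ _ _ _ (fun s a hs => PySem.Set.nodup_discard s a hs) s h
  · refine pv_nodup_walk _ _ _ _ (fun s a hs => ?_) s h
    by_cases hc : a ∈ s
    · simpa [PySem.Set.contains_iff, hc] using PySem.Set.nodup_discard s a hs
    · simpa [PySem.Set.contains_iff, hc] using PySem.Set.nodup_add s a hs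

theorem pv_lit_eq_foldl (instrs : List (Int × Int × Int × Int × Int)) (x y : Int) (b : Bool) :
    pvLitFrom instrs x y b = instrs.foldl (fun lit i => pvStep i (x, y) lit) b := by
  induction instrs generalizing b with
  | nil => rfl
  | cons i t ih =>
    obtain ⟨op, x1, y1, x2, y2⟩ := i
    simp only [pvLitFrom, List.foldl_cons] at *
    rw [ih]
    rfl

theorem pv_mem_fold_apply (instrs : List (Int × Int × Int × Int × Int))
    (hop : ∀ i ∈ instrs, i.1 = 0 ∨ i.1 = 1 ∨ i.1 = 2)
    (s : PySem.Set (Int × Int)) (c : Int × Int) :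
    (c ∈ instrs.foldl pvApply s ↔
      instrs.foldl (fun lit i => pvStep i c lit) (decide (c ∈ s)) = true) := by
  induction instrs generalizing s with
  | nil => simp
  | cons i t ih =>
    rw [List.foldl_cons, List.foldl_cons,
      ih (fun j hj => hop j (List.mem_cons_of_mem i hj)) (pvApply s i)]
    have := pv_mem_apply s i c (hop i (List.mem_cons_self))
    rw [show decide (c ∈ pvApply s i) = pvStep i c (decide (c ∈ s)) by
      rcases Bool.eq_false_or_eq_true (pvStep i c (decide (c ∈ s))) with h | h <;>
        simp [h] at this ⊢ <;> simp [this]]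

theorem pv_nodup_fold_apply (instrs : List (Int × Int × Int × Int × Int))
    (s : PySem.Set (Int × Int)) (h : s.Nodup) : (instrs.foldl pvApply s).Nodup := by
  induction instrs generalizing s with
  | nil => exact h
  | cons i t ih => exact ih _ (pv_nodup_apply s i h)

theorem pv_lit_mem (instrs : List (Int × Int × Int × Int × Int)) (c : Int × Int) (b : Bool)
    (h : instrs.foldl (fun lit i => pvStep i c lit) b = true) :
    b = true ∨ ∃ i ∈ instrs, pvInRect i c := by
  induction instrs generalizing b with
  | nil => exact Or.inl h
  | cons i t ih =>
    rw [List.foldl_cons] at h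
    rcases ih _ h with hb | ⟨j, hj, hr⟩
    · unfold pvStep at hb
      split_ifs at hb with hr hop2
      · exact Or.inr ⟨i, List.mem_cons_self, hr⟩
      · exact Or.inr ⟨i, List.mem_cons_self, hr⟩
      · exact Or.inl hb
    · exact Or.inr ⟨j, List.mem_cons_of_mem i hj, hr⟩

theorem pv_slice_get (f : List String) (k j : Nat) :
    PySem.List.pyGet? (PySem.List.slice f (some (k : Int)) none) (j : Int) =
      PySem.List.pyGet? f ((k + j : Nat) : Int) := by
  rw [PySem.List.slice_from_natCast, PySem.List.pyGet?_of_nonneg _ (by positivity),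
    PySem.List.pyGet?_of_nonneg _ (by positivity)]
  have h1 : ((j : Int)).toNat = j := by omega
  have h2 : (((k + j : Nat) : Int)).toNat = k + j := by omega
  rw [h1, h2, List.getElem?_drop]

theorem pv_update_eq_apply (s : PySem.Set (Int × Int)) (line : String)
    (h : pvLineOk line = true) :
    pvUpdateA s line = (pvParseLine line).elim s (fun i => pvApply s i) := by
  unfold pvLineOk at h
  unfold pvUpdateA pvParseLine
  by_cases h1 : PySem.Str.startswith line "turn on"
  · simp only [h1, true_or, if_true, if_pos] at h ⊢
    have e0 := pv_slice_get (PySem.Str.split₀ line) 2 0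
    have e2 := pv_slice_get (PySem.Str.split₀ line) 2 2
    norm_num at e0 e2
    unfold pvGetMinMax
    rw [e0, e2]
    rcases hg2 : PySem.List.pyGet? (PySem.Str.split₀ line) 2 with _ | a <;>
      rcases hg4 : PySem.List.pyGet? (PySem.Str.split₀ line) 4 with _ | b <;>
        simp only [hg2, hg4] at h ⊢ <;> try simp at h
    unfold pvFourInts at h
    rcases hm : ((PySem.Str.split? (PySem.Str.join "," [a, b]) ",").getD []).mapM
        PySem.Int.ofStr? with _ | l <;> rw [hm] at h <;> simp only at h
    · simp at h
    · rcases l with _ | ⟨x1, _ | ⟨y1, _ | ⟨x2, _ | ⟨y2, _ | _⟩⟩⟩⟩ <;> simp at h <;>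
        simp [hm, pvApply]
  · by_cases h2 : PySem.Str.startswith line "turn off"
    · simp only [h1, h2, or_true, false_or, if_true, if_false, if_pos] at h ⊢
      have e0 := pv_slice_get (PySem.Str.split₀ line) 2 0
      have e2 := pv_slice_get (PySem.Str.split₀ line) 2 2
      norm_num at e0 e2
      unfold pvGetMinMax
      rw [e0, e2]
      rcases hg2 : PySem.List.pyGet? (PySem.Str.split₀ line) 2 with _ | a <;>
        rcases hg4 : PySem.List.pyGet? (PySem.Str.split₀ line) 4 with _ | b <;>
          simp only [hg2, hg4] at h ⊢ <;> try simp at h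
      unfold pvFourInts at h
      rcases hm : ((PySem.Str.split? (PySem.Str.join "," [a, b]) ",").getD []).mapM
          PySem.Int.ofStr? with _ | l <;> rw [hm] at h <;> simp only at h
      · simp at h
      · rcases l with _ | ⟨x1, _ | ⟨y1, _ | ⟨x2, _ | ⟨y2, _ | _⟩⟩⟩⟩ <;> simp at h <;>
          simp [hm, pvApply]
    · by_cases h3 : PySem.Str.startswith line "toggle"
      · simp only [h1, h2, h3, or_self, false_or, or_false, if_true, if_false] at h ⊢
        have e0 := pv_slice_get (PySem.Str.split₀ line) 1 0
        have e2 := pv_slice_get (PySem.Str.split₀ line) 1 2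
        norm_num at e0 e2
        unfold pvGetMinMax
        rw [e0, e2]
        rcases hg2 : PySem.List.pyGet? (PySem.Str.split₀ line) 1 with _ | a <;>
          rcases hg4 : PySem.List.pyGet? (PySem.Str.split₀ line) 3 with _ | b <;>
            simp only [hg2, hg4] at h ⊢ <;> try simp at h
        unfold pvFourInts at h
        rcases hm : ((PySem.Str.split? (PySem.Str.join "," [a, b]) ",").getD []).mapM
            PySem.Int.ofStr? with _ | l <;> rw [hm] at h <;> simp only at h
        · simp at h
        · rcases l with _ | ⟨x1, _ | ⟨y1, _ | ⟨x2, _ | ⟨y2, _ | _⟩⟩⟩⟩ <;> simp at h <;>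
            simp [hm, pvApply]
      · simp only [h1, h2, h3, if_false]
        rfl

theorem pv_parse_op (line : String) (i : Int × Int × Int × Int × Int)
    (h : pvParseLine line = some i) : i.1 = 0 ∨ i.1 = 1 ∨ i.1 = 2 := by
  unfold pvParseLine at h
  dsimp only at h
  repeat' split at h
  all_goals (cases h <;> try simp)
  all_goals rename_i heq1 x x1 y1 x2 y2 heq2
  all_goals (repeat' split at heq1)
  all_goals (cases heq1 <;> simp)

def pvInstrsOf (lines : List String) : List (Int × Int × Int × Int × Int) :=
  lines.flatMap (fun l => (pvParseLine l).toList)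

theorem pv_b_acc (lines : List String) (acc : List (Int × Int × Int × Int × Int)) :
    lines.foldl
      (fun acc line => match pvParseLine line with
        | some i => acc ++ [i]
        | none => acc) acc = acc ++ pvInstrsOf lines := by
  induction lines generalizing acc with
  | nil => simp [pvInstrsOf]
  | cons l t ih =>
    rcases hl : pvParseLine l with _ | i <;>
      simp [pvInstrsOf, hl, ih, List.flatMap_cons]

theorem pv_a_fold (lines : List String) (s : PySem.Set (Int × Int))
    (h : lines.all pvLineOk = true) :
    lines.foldl pvUpdateA s = (pvInstrsOf lines).foldl pvApply s := by
  induction lines generalizing s with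
  | nil => rfl
  | cons l t ih =>
    rw [List.all_cons, Bool.and_eq_true] at h
    rw [List.foldl_cons, pv_update_eq_apply s l h.1]
    rcases hl : pvParseLine l with _ | i <;>
      simp only [hl, Option.elim, pvInstrsOf, List.flatMap_cons, Option.toList] <;>
        simp only [List.nil_append, List.singleton_append, List.foldl_cons] <;>
          exact ih _ h.2

theorem pv_ops_instrsOf (lines : List String) :
    ∀ i ∈ pvInstrsOf lines, i.1 = 0 ∨ i.1 = 1 ∨ i.1 = 2 := by
  intro i hi
  rw [pvInstrsOf, List.mem_flatMap] at hi
  obtain ⟨l, _, hm⟩ := hi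
  rcases hp : pvParseLine l with _ | j <;> rw [hp] at hm <;> simp at hm
  exact hm ▸ pv_parse_op l j hp

theorem pv_sum_eq (minX maxX minY maxY : Int)
    (p : Int → Int → Bool) :
    (PySem.List.pyRange minX (maxX + 1)).foldl
      (fun t x =>
        (PySem.List.pyRange minY (maxY + 1)).foldl
          (fun t y => t + (if p x y then 1 else 0)) t) 0
      = ((pvProd minX minY maxX maxY).countP (fun c => p c.1 c.2) : Int) := by
  have h1 : (PySem.List.pyRange minX (maxX + 1)).foldl
      (fun t x =>
        (PySem.List.pyRange minY (maxY + 1)).foldl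
          (fun (t : Int) y => t + (if p x y then 1 else 0)) t) 0
      = (pvProd minX minY maxX maxY).foldl (fun (t : Int) c => t + (if p c.1 c.2 then 1 else 0)) 0 := by
    simp [pvProd, SProd.sprod, List.product, List.foldl_flatMap, List.foldl_map]
  refine h1.trans ?_
  rw [show (pvProd minX minY maxX maxY).foldl
        (fun (t : Int) c => t + (if p c.1 c.2 then 1 else 0)) 0
      = 0 + ((pvProd minX minY maxX maxY).map
          (fun c => if p c.1 c.2 then (1:Int) else 0)).sum
    from PySem.List.foldl_add _ _ _, PySem.List.sum_map_ite_one_zero]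
  simp

theorem pv_main (lines : List String) (hpre : lines.all pvLineOk = true) :
    part_one lines = part_one_alt lines := by
  have hacc := pv_b_acc lines []
  set instrs := pvInstrsOf lines with hinstrs
  have hS : lines.foldl pvUpdateA PySem.Set.empty = instrs.foldl pvApply [] :=
    pv_a_fold lines _ hpre
  set S := instrs.foldl pvApply ([] : PySem.Set (Int × Int)) with hSdef
  have hop := pv_ops_instrsOf lines
  have hmemS : ∀ c, c ∈ S ↔ pvLitFrom instrs c.1 c.2 false = true := by
    intro c
    rw [hSdef, pv_mem_fold_apply instrs hop [] c, pv_lit_eq_foldl]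
    simp
  have hnodS : S.Nodup := pv_nodup_fold_apply instrs [] (List.nodup_nil)
  rw [part_one, part_one_alt]
  simp only [hacc, List.nil_append]
  rw [hS]
  by_cases hne : instrs = []
  · rw [if_pos hne]
    have hS0 : S = [] := List.eq_nil_iff_forall_not_mem.mpr (fun c hc => by
      rw [hmemS c, hne] at hc; simp [pvLitFrom] at hc)
    simp [PySem.Set.len, hS0]
  · rw [if_neg hne]
    have hmap : ∀ (g : (Int × Int × Int × Int × Int) → Int), instrs.map g ≠ [] := by
      intro g h
      exact hne (List.map_eq_nil_iff.mp h)
    obtain ⟨minX, hminX⟩ := Option.ne_none_iff_exists'.mp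
      (fun h => hmap (fun i => i.2.1)
        ((PySem.List.min?_eq_none_iff (instrs.map (fun i => i.2.1)) (id : Int → Int)).mp h))
    obtain ⟨maxX, hmaxX⟩ := Option.ne_none_iff_exists'.mp
      (fun h => hmap (fun i => i.2.2.2.1)
        ((PySem.List.max?_eq_none_iff (instrs.map (fun i => i.2.2.2.1)) (id : Int → Int)).mp h))
    obtain ⟨minY, hminY⟩ := Option.ne_none_iff_exists'.mp
      (fun h => hmap (fun i => i.2.2.1)
        ((PySem.List.min?_eq_none_iff (instrs.map (fun i => i.2.2.1)) (id : Int → Int)).mp h))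
    obtain ⟨maxY, hmaxY⟩ := Option.ne_none_iff_exists'.mp
      (fun h => hmap (fun i => i.2.2.2.2)
        ((PySem.List.max?_eq_none_iff (instrs.map (fun i => i.2.2.2.2)) (id : Int → Int)).mp h))
    rw [hminX, hmaxX, hminY, hmaxY]
    dsimp only
    rw [pv_sum_eq minX maxX minY maxY (fun x y => pvLitFrom instrs x y false)]
    -- it remains to count: |S| = countP over the bounding box
    have hsub : ∀ c : Int × Int, pvLitFrom instrs c.1 c.2 false = true →
        c ∈ pvProd minX minY maxX maxY := by
      intro c hc
      rw [pv_lit_eq_foldl] at hc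
      rcases pv_lit_mem instrs c false hc with h | ⟨i, hi, hr⟩
      · exact absurd h (by simp)
      · rw [pv_mem_prod]
        obtain ⟨r1, r2, r3, r4⟩ := hr
        have b1 := PySem.List.min?_isMin hminX (i.2.1) (List.mem_map_of_mem hi)
        have b2 := PySem.List.max?_isMax hmaxX (i.2.2.2.1) (List.mem_map_of_mem hi)
        have b3 := PySem.List.min?_isMin hminY (i.2.2.1) (List.mem_map_of_mem hi)
        have b4 := PySem.List.max?_isMax hmaxY (i.2.2.2.2) (List.mem_map_of_mem hi)
        simp only [id] at b1 b2 b3 b4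
        omega
    have hperm : S.Perm ((pvProd minX minY maxX maxY).filter
        (fun c => pvLitFrom instrs c.1 c.2 false)) := by
      rw [List.perm_ext_iff_of_nodup hnodS
        ((pv_nodup_prod minX minY maxX maxY).filter _)]
      intro c
      rw [hmemS c, List.mem_filter]
      constructor
      · intro hc; exact ⟨hsub c hc, hc⟩
      · intro hc; exact hc.2
    rw [PySem.Set.len, hperm.length_eq, List.countP_eq_length_filter]

-- ===== VERDICT (by name: the statement is the Claim_ definition above) =====
theorem part_one_spec : Claim_equal_part_one := by
  intro lines _ hpre
  unfold Spec_part_one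
  exact pv_main lines hpre
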